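-- pv_equiv track=rewrite | github.com/ajmck/general | Papermaker/methods.py | __squareangles__
-- ===== SOURCE A (Python) =====
-- def __squareangles__(minX, minY, maxX, maxY):
--     points = []
--     factor = 80
--     height = minY + factor
--
--     p1 = (minX, minY)
--     p2 = (minX, height)
--     p3 = (minX + factor, minY)
--
--
--     while height < maxY + factor:
--         while p1[0] < maxX + factor:
--             points.append((p1, p2, p3))
--             p1 = p2
--             p2 = p3
--             p3 = (p1[0] + factor, p1[1])
--             # print p1, p2, p3
--         # print "New Row"
--         p1 = (minX, height)
--         p2 = (minX, height + factor)
--         p3 = (minX + factor, height)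
--
--         height += factor
--
--     return points
-- ===== SOURCE B (Python) =====
-- def __squareangles__(minX, minY, maxX, maxY):
--     f = 80
--     rows = max(0, -((minY - maxY) // f))          # ceil((maxY - minY) / f)
--     cols = max(0, -((minX - maxX - f) // f))      # ceil((maxX + f - minX) / f)
--     return [tri
--             for j in range(rows)
--             for i in range(cols)
--             for tri in (((minX + i*f, minY + j*f), (minX + i*f, minY + j*f + f), (minX + i*f + f, minY + j*f)),
--                         ((minX + i*f, minY + j*f + f), (minX + i*f + f, minY + j*f), (minX + i*f + f, minY + j*f + f)))]
-- ===== Notes on version B (the rewrite author's own statement) =====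
-- stated objective: simpler
-- what changed: Replaces A's three-pointer sliding-window while loops (p1=p2; p2=p3; p3=...) with a closed-form grid: row/column counts computed once by ceiling division, then a single flat comprehension over grid indices emitting each cell's two triangles directly.
import Mathlib
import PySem

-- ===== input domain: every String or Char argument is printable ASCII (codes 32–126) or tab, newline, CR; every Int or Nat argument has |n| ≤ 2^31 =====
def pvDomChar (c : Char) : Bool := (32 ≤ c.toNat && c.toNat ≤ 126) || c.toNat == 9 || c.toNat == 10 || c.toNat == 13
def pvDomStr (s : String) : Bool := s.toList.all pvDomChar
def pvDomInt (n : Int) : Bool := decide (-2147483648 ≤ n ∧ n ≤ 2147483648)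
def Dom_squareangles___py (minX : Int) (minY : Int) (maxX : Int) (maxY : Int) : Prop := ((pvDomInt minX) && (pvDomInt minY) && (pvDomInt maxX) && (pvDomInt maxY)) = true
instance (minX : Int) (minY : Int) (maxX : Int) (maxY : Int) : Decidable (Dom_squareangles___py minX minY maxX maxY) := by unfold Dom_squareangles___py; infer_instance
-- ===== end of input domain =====

-- B replaces A's three-pointer sliding-window while loops with a closed-form comprehension:
-- row/column counts by ceiling division, then a flat comprehension over grid indices (simpler).

-- ===== PORT A =====
-- inner `while p1[0] < maxX + factor` loop of A (fuel = totality guard; the loop advances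
-- p1.x by 80 every other iteration, so the fuel passed at the call site always outlasts it)
def pvInnerA (maxX : Int) (fuel : Nat) (p1 p2 p3 : Int × Int)
    (points : List (List (Int × Int))) : List (List (Int × Int)) :=
  match fuel with
  | 0 => points
  | f + 1 =>
    if p1.1 < maxX + 80 then
      pvInnerA maxX f p2 p3 (p2.1 + 80, p2.2) (points ++ [[p1, p2, p3]])
    else points

-- outer `while height < maxY + factor` loop of A
def pvOuterA (minX maxX maxY : Int) (fuel : Nat) (height : Int) (p1 p2 p3 : Int × Int)
    (points : List (List (Int × Int))) : List (List (Int × Int)) :=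
  match fuel with
  | 0 => points
  | f + 1 =>
    if height < maxY + 80 then
      pvOuterA minX maxX maxY f (height + 80) (minX, height) (minX, height + 80) (minX + 80, height)
        (pvInnerA maxX (maxX + 120 - minX).toNat p1 p2 p3 points)
    else points

def squareangles___py (minX : Int) (minY : Int) (maxX : Int) (maxY : Int) : List (List (Int × Int)) :=
  let factor := 80
  let height := minY + factor
  let p1 := (minX, minY)
  let p2 := (minX, height)
  let p3 := (minX + factor, minY)
  pvOuterA minX maxX maxY (maxY + 160 - minY).toNat height p1 p2 p3 []

-- ===== PORT B =====
-- Source B: row/column counts via floor division, then one flat comprehension over grid indices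
def squareangles___py_alt (minX : Int) (minY : Int) (maxX : Int) (maxY : Int) : List (List (Int × Int)) :=
  let f : Int := 80
  let rows := max 0 (-(PySem.Int.floordiv (minY - maxY) f))
  let cols := max 0 (-(PySem.Int.floordiv (minX - maxX - f) f))
  (List.range rows.toNat).flatMap (fun (j : Nat) =>
    (List.range cols.toNat).flatMap (fun (i : Nat) =>
      [[(minX + (i : Int) * f, minY + (j : Int) * f), (minX + (i : Int) * f, minY + (j : Int) * f + f), (minX + (i : Int) * f + f, minY + (j : Int) * f)],
       [(minX + (i : Int) * f, minY + (j : Int) * f + f), (minX + (i : Int) * f + f, minY + (j : Int) * f), (minX + (i : Int) * f + f, minY + (j : Int) * f + f)]]))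

-- ===== PRECONDITION & SPEC =====
def Spec_squareangles___py (minX : Int) (minY : Int) (maxX : Int) (maxY : Int) (out : List (List (Int × Int))) : Prop := out = squareangles___py_alt minX minY maxX maxY
instance (minX : Int) (minY : Int) (maxX : Int) (maxY : Int) (out : List (List (Int × Int))) : Decidable (Spec_squareangles___py minX minY maxX maxY out) := by unfold Spec_squareangles___py; infer_instance

-- ===== CLAIM =====
def Claim_equal_squareangles___py : Prop := ∀ (minX : Int) (minY : Int) (maxX : Int) (maxY : Int), Dom_squareangles___py minX minY maxX maxY → Spec_squareangles___py minX minY maxX maxY (squareangles___py minX minY maxX maxY)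

-- ===== LEMMAS AND PROOFS =====

-- the two triangles B emits for grid cell (x, y)
def pvCell (y x : Int) : List (List (Int × Int)) :=
  [[(x, y), (x, y + 80), (x + 80, y)],
   [(x, y + 80), (x + 80, y), (x + 80, y + 80)]]

lemma pv_range_succ_flatMap {α : Type} (f : Nat → List α) (n : Nat) :
    (List.range (n + 1)).flatMap f = f 0 ++ (List.range n).flatMap (fun (i : Nat) => f (i + 1)) := by
  simp [List.range_succ_eq_map, List.flatMap_map, Nat.succ_eq_add_one]

-- Two iterations of A's inner window from row state ((x,y),(x,y+80),(x+80,y)) append exactly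
-- pvCell y x and reach the state at x+80; n counts the remaining cells of the row.
lemma pv_inner_eq (maxX y : Int) : ∀ (n : Nat) (fa : Nat) (x : Int) (acc : List (List (Int × Int))),
    2 * n ≤ fa → maxX + 80 ≤ x + 80 * n → (n = 0 ∨ x + 80 * ((n : Int) - 1) < maxX + 80) →
    pvInnerA maxX fa (x, y) (x, y + 80) (x + 80, y) acc
      = acc ++ (List.range n).flatMap (fun (i : Nat) => pvCell y (x + 80 * (i : Int))) := by
  intro n
  induction n with
  | zero =>
    intro fa x acc _ hub _
    simp only [Nat.cast_zero, mul_zero, add_zero] at hub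
    match fa with
    | 0 => simp [pvInnerA]
    | f + 1 =>
      rw [pvInnerA, if_neg (show ¬ ((x, y) : Int × Int).1 < maxX + 80 by simpa using by omega)]
      simp
  | succ n ih =>
    intro fa x acc hf hub hlb
    have hx : x < maxX + 80 := by
      rcases hlb with h | h
      · omega
      · push_cast at h
        have : (0 : Int) ≤ 80 * n := by positivity
        omega
    obtain ⟨f, rfl⟩ : ∃ f, fa = f + 2 := ⟨fa - 2, by omega⟩
    rw [pvInnerA, if_pos (show ((x, y) : Int × Int).1 < maxX + 80 from hx)]
    rw [pvInnerA, if_pos (show ((x, y + 80) : Int × Int).1 < maxX + 80 from hx)]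
    have ihx := ih f (x + 80)
      (acc ++ [[(x, y), (x, y + 80), (x + 80, y)]] ++ [[(x, y + 80), (x + 80, y), (x + 80, y + 80)]])
      (by omega)
      (by push_cast at hub ⊢; omega)
      (by
        rcases Nat.eq_zero_or_pos n with h0 | h0
        · exact Or.inl h0
        · right
          rcases hlb with h | h
          · omega
          · push_cast at h ⊢
            omega)
    rw [ihx, pv_range_succ_flatMap (fun (i : Nat) => pvCell y (x + 80 * (i : Int))) n]
    have hcell : ∀ i : Nat, pvCell y (x + 80 * ((i : Int) + 1)) = pvCell y (x + 80 + 80 * (i : Int)) := by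
      intro i; congr 1; ring
    simp only [Nat.cast_zero, mul_zero, add_zero, Nat.cast_add, Nat.cast_one, hcell,
      List.append_assoc]
    simp [pvCell]

-- One iteration of A's outer loop at height = y + 80 (row base y) appends one full row and
-- re-creates the row state at y + 80; m counts the remaining rows, n the cells per row.
lemma pv_outer_eq (minX maxX maxY : Int) (n : Nat)
    (hn1 : 2 * n ≤ (maxX + 120 - minX).toNat)
    (hn2 : maxX + 80 ≤ minX + 80 * n)
    (hn3 : n = 0 ∨ minX + 80 * ((n : Int) - 1) < maxX + 80) :
    ∀ (m : Nat) (fa : Nat) (y : Int) (acc : List (List (Int × Int))),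
    m ≤ fa → maxY ≤ y + 80 * m → (m = 0 ∨ y + 80 * ((m : Int) - 1) < maxY) →
    pvOuterA minX maxX maxY fa (y + 80) (minX, y) (minX, y + 80) (minX + 80, y) acc
      = acc ++ (List.range m).flatMap
          (fun (j : Nat) => (List.range n).flatMap (fun (i : Nat) => pvCell (y + 80 * (j : Int)) (minX + 80 * (i : Int)))) := by
  intro m
  induction m with
  | zero =>
    intro fa y acc _ hub _
    simp only [Nat.cast_zero, mul_zero, add_zero] at hub
    match fa with
    | 0 => simp [pvOuterA]
    | f + 1 =>
      rw [pvOuterA, if_neg (show ¬ y + 80 < maxY + 80 by omega)]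
      simp
  | succ m ih =>
    intro fa y acc hf hub hlb
    have hy : y < maxY := by
      rcases hlb with h | h
      · omega
      · push_cast at h
        have : (0 : Int) ≤ 80 * m := by positivity
        omega
    obtain ⟨f, rfl⟩ : ∃ f, fa = f + 1 := ⟨fa - 1, by omega⟩
    rw [pvOuterA, if_pos (show y + 80 < maxY + 80 by omega)]
    rw [pv_inner_eq maxX y n (maxX + 120 - minX).toNat minX acc hn1 hn2 hn3]
    have ihx := ih f (y + 80)
      (acc ++ (List.range n).flatMap (fun (i : Nat) => pvCell y (minX + 80 * (i : Int))))
      (by omega)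
      (by push_cast at hub ⊢; omega)
      (by
        rcases Nat.eq_zero_or_pos m with h0 | h0
        · exact Or.inl h0
        · right
          rcases hlb with h | h
          · omega
          · push_cast at h ⊢
            omega)
    rw [ihx, pv_range_succ_flatMap
      (fun (j : Nat) => (List.range n).flatMap (fun (i : Nat) => pvCell (y + 80 * (j : Int)) (minX + 80 * (i : Int)))) m]
    simp only [Nat.cast_zero, mul_zero, add_zero, List.append_assoc]
    congr 2
    apply List.flatMap_congr
    intro j _
    apply List.flatMap_congr
    intro i _
    congr 1
    push_cast
    ring

-- the ceiling-division count -((lo - hi) // 80) satisfies the bracketing the loop lemmas need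
lemma pv_cols_spec (lo hi : Int) :
    hi ≤ lo + 80 * (((max 0 (-(PySem.Int.floordiv (lo - hi) 80))).toNat : Int)) ∧
    ((max 0 (-(PySem.Int.floordiv (lo - hi) 80))).toNat = 0 ∨
      lo + 80 * ((((max 0 (-(PySem.Int.floordiv (lo - hi) 80))).toNat : Nat) : Int) - 1) < hi) := by
  rw [show PySem.Int.floordiv (lo - hi) 80 = (lo - hi) / 80 from
    PySem.Int.floordiv_eq_ediv_of_pos (by norm_num)]
  constructor
  · omega
  · omega

-- ===== VERDICT =====
theorem squareangles___py_spec : Claim_equal_squareangles___py := by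
  intro minX minY maxX maxY _
  show squareangles___py minX minY maxX maxY = squareangles___py_alt minX minY maxX maxY
  unfold squareangles___py squareangles___py_alt
  obtain ⟨hc1, hc2⟩ := pv_cols_spec minX (maxX + 80)
  rw [show minX - (maxX + 80) = minX - maxX - 80 by ring] at hc1 hc2
  obtain ⟨hr1, hr2⟩ := pv_cols_spec minY maxY
  set n := (max 0 (-(PySem.Int.floordiv (minX - maxX - 80) 80))).toNat with hndef
  set m := (max 0 (-(PySem.Int.floordiv (minY - maxY) 80))).toNat with hmdef
  have hfuel : 2 * n ≤ (maxX + 120 - minX).toNat := by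
    rcases hc2 with h | h
    · omega
    · omega
  have hfa : m ≤ (maxY + 160 - minY).toNat := by
    rcases hr2 with h | h
    · omega
    · omega
  have key := pv_outer_eq minX maxX maxY n hfuel hc1 hc2 m (maxY + 160 - minY).toNat minY [] hfa hr1 hr2
  simp only [List.nil_append] at key
  rw [key]
  apply List.flatMap_congr
  intro j _
  apply List.flatMap_congr
  intro i _
  simp [pvCell, mul_comm]
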